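-- pv_equiv track=rewrite | github.com/pgarrett-scripps/peptacular | src/peptacular/protein.py | filter_peptides
-- ===== SOURCE A (Python) =====
-- from typing import Tuple, List, Any, Set, Dict, Generator, Union
--
-- def filter_peptides(peptides: List[str]) -> Set[Tuple[str, int]]:
--     peptide_dict = {}
--     for (peptide, peptide_type) in peptides:
--         found_peptide_type = peptide_dict.setdefault(peptide, peptide_type)
--
--         if found_peptide_type == -1:
--             peptide_dict[peptide] = peptide_type
--         elif peptide_type != -1:
--             continue
--         else:
--             if peptide_type < found_peptide_type:
--                 peptide_dict[peptide] = peptide_type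
--
--     return {(peptide, peptide_dict[peptide]) for peptide in peptide_dict}
-- ===== SOURCE B (Python) =====
-- def filter_peptides(peptides):
--     # Group-then-reduce: first pass groups all types per peptide; second pass
--     # folds each group's list down to the preferred type.
--     groups = {}
--     for peptide, peptide_type in peptides:
--         groups.setdefault(peptide, []).append(peptide_type)
--     return {(peptide, _reduce_types(types)) for peptide, types in groups.items()}
--
--
-- def _reduce_types(types):
--     cur = types[0]
--     for t in types[1:]:
--         if cur == -1:
--             cur = t
--         elif t != -1:
--             continue
--         elif t < cur:
--             cur = t
--     return cur
-- ===== Notes on version B (the rewrite author's own statement) =====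
-- stated objective: alternative
-- what changed: Replaces A's single pass that maintains one running preferred type per peptide (setdefault + in-place decision logic) with a group-then-reduce decomposition: one append-only pass building peptide -> list of all its types, then an independent fold per peptide computing the preferred type.
import Mathlib
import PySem

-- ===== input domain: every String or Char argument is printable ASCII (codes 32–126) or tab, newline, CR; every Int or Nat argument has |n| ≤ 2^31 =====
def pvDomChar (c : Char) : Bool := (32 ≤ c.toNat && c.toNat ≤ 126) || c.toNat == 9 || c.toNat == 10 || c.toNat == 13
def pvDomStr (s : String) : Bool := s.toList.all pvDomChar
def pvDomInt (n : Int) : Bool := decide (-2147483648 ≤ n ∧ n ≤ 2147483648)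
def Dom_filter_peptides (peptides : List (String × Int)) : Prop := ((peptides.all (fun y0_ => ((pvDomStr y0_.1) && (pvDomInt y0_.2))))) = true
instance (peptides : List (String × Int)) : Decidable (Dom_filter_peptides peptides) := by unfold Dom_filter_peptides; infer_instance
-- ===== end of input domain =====

-- B replaces A's single running-best pass with a group-then-reduce decomposition
-- (peptide -> list of all its types, then a per-peptide fold); alternative, same cost.

-- ===== PORT A =====
-- one iteration of A's loop body
def aStep (d : PySem.Dict String Int) (pr : String × Int) : PySem.Dict String Int :=
  let peptide := pr.1
  let peptide_type := pr.2
  -- found_peptide_type = peptide_dict.setdefault(peptide, peptide_type)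
  let found := (d.get? peptide).getD peptide_type
  let d := d.setdefault peptide peptide_type
  if found = -1 then d.insert peptide peptide_type
  else if peptide_type ≠ -1 then d
  else if peptide_type < found then d.insert peptide peptide_type else d

def filter_peptides (peptides : List (String × Int)) : List (String × Int) :=
  let d := peptides.foldl aStep PySem.Dict.empty
  -- {(peptide, peptide_dict[peptide]) for peptide in peptide_dict}
  -- peptide_dict[peptide] ported as getD p 0: exact here since p ranges over d.keys
  PySem.Set.ofList (d.keys.map (fun p => (p, d.getD p 0)))

-- ===== PORT B =====
-- one iteration of B's grouping loop: groups.setdefault(peptide, []).append(t)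
def gStep (d : PySem.Dict String (List Int)) (pr : String × Int) : PySem.Dict String (List Int) :=
  d.modify pr.1 [] (· ++ [pr.2])

-- _reduce_types loop body: the if/elif/elif chain on (cur, t)
def rStep (cur t : Int) : Int :=
  if cur = -1 then t
  else if t ≠ -1 then cur
  else if t < cur then t else cur

-- _reduce_types: cur = types[0], then the loop over types[1:]
-- (group lists are always nonempty; [] is unreachable, returns 0 there)
def reduceTypes : List Int → Int
  | [] => 0
  | h :: tl => tl.foldl rStep h

def filter_peptides_alt (peptides : List (String × Int)) : List (String × Int) :=
  let groups := peptides.foldl gStep PySem.Dict.empty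
  PySem.Set.ofList (groups.items.map (fun q => (q.1, reduceTypes q.2)))

-- ===== PRECONDITION & SPEC =====
def Spec_filter_peptides (peptides : List (String × Int)) (out : List (String × Int)) : Prop := out = filter_peptides_alt peptides
instance (peptides : List (String × Int)) (out : List (String × Int)) : Decidable (Spec_filter_peptides peptides out) := by unfold Spec_filter_peptides; infer_instance

-- ===== CLAIM (what is proved, stated in full; the proofs are below) =====
def Claim_equal_filter_peptides : Prop := ∀ (peptides : List (String × Int)), Dom_filter_peptides peptides → Spec_filter_peptides peptides (filter_peptides peptides)

-- ===== LEMMAS AND PROOFS =====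

-- A's dict is the image of B's groups dict under per-value reduction
def mapDict (G : PySem.Dict String (List Int)) : PySem.Dict String Int :=
  PySem.Dict.mk (G.items.map (fun q => (q.1, reduceTypes q.2)))

lemma get?_mapDict (G : PySem.Dict String (List Int)) (p : String) :
    (mapDict G).get? p = (G.get? p).map reduceTypes := by
  obtain ⟨l⟩ := G
  induction l with
  | nil => rfl
  | cons q tl ih =>
    obtain ⟨k, v⟩ := q
    simp only [mapDict, List.map_cons, PySem.Dict.get?_mk_cons] at *
    split <;> simp_all

lemma keys_mapDict (G : PySem.Dict String (List Int)) :
    (mapDict G).keys = G.keys := by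
  obtain ⟨l⟩ := G
  simp [mapDict, PySem.Dict.keys]

lemma contains_mapDict (G : PySem.Dict String (List Int)) (p : String) :
    (mapDict G).contains p = G.contains p := by
  obtain ⟨l⟩ := G
  simp [mapDict, PySem.Dict.contains, List.any_map, Function.comp_def]

lemma reduceTypes_append (h : Int) (tl : List Int) (t : Int) :
    reduceTypes ((h :: tl) ++ [t]) = rStep (reduceTypes (h :: tl)) t := by
  simp [reduceTypes, List.foldl_append]

-- mapDict commutes with insert (insert rewrites every matching entry, so no key hypotheses)
lemma mapDict_insert (G : PySem.Dict String (List Int)) (p : String) (v : List Int) :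
    mapDict (G.insert p v) = (mapDict G).insert p (reduceTypes v) := by
  cases hc : G.contains p with
  | true =>
    have hc' : (mapDict G).contains p = true := by rw [contains_mapDict]; exact hc
    apply PySem.Dict.ext
    show ((G.insert p v).items.map (fun q => (q.1, reduceTypes q.2))) = _
    rw [PySem.Dict.items_insert_of_contains _ _ hc,
        PySem.Dict.items_insert_of_contains _ _ hc']
    show _ = (G.items.map (fun q => (q.1, reduceTypes q.2))).map _
    rw [List.map_map, List.map_map]
    apply List.map_congr_left
    intro q _
    by_cases hq : q.1 = p <;> simp [hq]
  | false =>
    have hc' : (mapDict G).contains p = false := by rw [contains_mapDict]; exact hc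
    apply PySem.Dict.ext
    show ((G.insert p v).items.map (fun q => (q.1, reduceTypes q.2))) = _
    rw [PySem.Dict.items_insert_of_not_contains _ _ hc,
        PySem.Dict.items_insert_of_not_contains _ _ hc']
    simp [mapDict]

-- insert of the value already present is the identity (needs unique keys)
lemma insert_self_of_get? (d : PySem.Dict String Int) (p : String) (v : Int)
    (hnd : d.keys.Nodup) (h : d.get? p = some v) : d.insert p v = d := by
  have hc : d.contains p = true := by
    simp [PySem.Dict.contains_eq_isSome_get?, h]
  apply PySem.Dict.ext
  rw [PySem.Dict.items_insert_of_contains _ _ hc]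
  have hid : ∀ q ∈ d.items, (if (q.1 == p) = true then (p, v) else q) = q := by
    intro q hq
    by_cases hqp : q.1 = p
    · rw [if_pos (by simp [hqp])]
      obtain ⟨k, w⟩ := q
      simp only at hqp
      subst hqp
      have := PySem.Dict.get?_of_mem_items _ hq hnd
      rw [this] at h
      cases h
      rfl
    · rw [if_neg (by simp [hqp])]
  rw [List.map_congr_left hid, List.map_id']

-- one step of A simulates one step of B through mapDict
lemma step_sim (G : PySem.Dict String (List Int)) (pr : String × Int)
    (hnd : G.keys.Nodup) (hne : ∀ q ∈ G.items, q.2 ≠ []) :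
    aStep (mapDict G) pr = mapDict (gStep G pr) := by
  obtain ⟨p, t⟩ := pr
  have hmnd : (mapDict G).keys.Nodup := by rw [keys_mapDict]; exact hnd
  rw [gStep, PySem.Dict.modify, mapDict_insert]
  rw [aStep]
  simp only []
  cases hg : G.get? p with
  | none =>
    have hm : (mapDict G).get? p = none := by rw [get?_mapDict, hg]; rfl
    have hc : (mapDict G).contains p = false := by
      simp [PySem.Dict.contains_eq_isSome_get?, hm]
    have hd : G.getD p [] = [] := PySem.Dict.getD_of_get?_eq_none _ _ hg
    rw [hm, hd]
    rw [PySem.Dict.setdefault_of_not_contains _ _ hc]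
    simp only [Option.getD_none, List.nil_append]
    have hr : reduceTypes [t] = t := rfl
    rw [hr]
    by_cases ht : t = (-1 : Int)
    · rw [if_pos ht, PySem.Dict.insert_insert_self]
    · rw [if_neg ht, if_pos ht]
  | some ts =>
    have hm : (mapDict G).get? p = some (reduceTypes ts) := by rw [get?_mapDict, hg]; rfl
    have hc : (mapDict G).contains p = true := by
      simp [PySem.Dict.contains_eq_isSome_get?, hm]
    have hd : G.getD p [] = ts := PySem.Dict.getD_of_get?_eq_some _ _ hg
    have hts : ts ≠ [] := hne _ (PySem.Dict.mem_items_of_get?_eq_some _ hg)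
    obtain ⟨h0, tl, rfl⟩ : ∃ h0 tl, ts = h0 :: tl := by
      cases ts with | nil => exact absurd rfl hts | cons a b => exact ⟨a, b, rfl⟩
    rw [hm, hd, PySem.Dict.setdefault_of_contains _ _ hc, reduceTypes_append]
    simp only [Option.getD_some]
    set c := reduceTypes (h0 :: tl) with hcdef
    by_cases hc1 : c = (-1 : Int)
    · rw [if_pos hc1, rStep, if_pos hc1]
    · rw [if_neg hc1, rStep, if_neg hc1]
      by_cases ht1 : t ≠ (-1 : Int)
      · rw [if_pos ht1, if_pos ht1]
        exact (insert_self_of_get? _ _ _ hmnd hm).symm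
      · rw [if_neg ht1, if_neg ht1]
        by_cases hlt : t < c
        · rw [if_pos hlt, if_pos hlt]
        · rw [if_neg hlt, if_neg hlt]
          exact (insert_self_of_get? _ _ _ hmnd hm).symm

-- the grouping loop keeps keys unique and group lists nonempty
lemma gStep_inv (G : PySem.Dict String (List Int)) (pr : String × Int)
    (hnd : G.keys.Nodup) (hne : ∀ q ∈ G.items, q.2 ≠ []) :
    (gStep G pr).keys.Nodup ∧ ∀ q ∈ (gStep G pr).items, q.2 ≠ [] := by
  constructor
  · exact PySem.Dict.nodup_keys_insert _ _ _ hnd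
  · intro q hq
    rw [gStep, PySem.Dict.modify] at hq
    rcases (PySem.Dict.mem_items_insert _ _ _ _).1 hq with h | h
    · subst h; simp
    · exact hne _ h.1

lemma foldl_sim (l : List (String × Int)) (G : PySem.Dict String (List Int))
    (hnd : G.keys.Nodup) (hne : ∀ q ∈ G.items, q.2 ≠ []) :
    l.foldl aStep (mapDict G) = mapDict (l.foldl gStep G) := by
  induction l generalizing G with
  | nil => rfl
  | cons pr tl ih =>
    rw [List.foldl_cons, List.foldl_cons, step_sim G pr hnd hne]
    exact ih _ (gStep_inv G pr hnd hne).1 (gStep_inv G pr hnd hne).2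

lemma foldl_g_inv (l : List (String × Int)) (G : PySem.Dict String (List Int))
    (hnd : G.keys.Nodup) (hne : ∀ q ∈ G.items, q.2 ≠ []) :
    (l.foldl gStep G).keys.Nodup ∧ ∀ q ∈ (l.foldl gStep G).items, q.2 ≠ [] := by
  induction l generalizing G with
  | nil => exact ⟨hnd, hne⟩
  | cons pr tl ih =>
    rw [List.foldl_cons]
    exact ih _ (gStep_inv G pr hnd hne).1 (gStep_inv G pr hnd hne).2

-- ===== VERDICT (by name: the statement is the Claim_ definition above) =====
theorem filter_peptides_spec : Claim_equal_filter_peptides := by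
  intro peptides _
  unfold Spec_filter_peptides filter_peptides filter_peptides_alt
  have h0nd : (PySem.Dict.empty : PySem.Dict String (List Int)).keys.Nodup := List.nodup_nil
  have h0ne : ∀ q ∈ (PySem.Dict.empty : PySem.Dict String (List Int)).items, q.2 ≠ [] := by
    intro q hq; simp [PySem.Dict.empty] at hq
  have hstart : (PySem.Dict.empty : PySem.Dict String Int) =
      mapDict (PySem.Dict.empty : PySem.Dict String (List Int)) := rfl
  rw [hstart, foldl_sim peptides _ h0nd h0ne]
  set GG := peptides.foldl gStep PySem.Dict.empty with hGG
  have hinv := foldl_g_inv peptides _ h0nd h0ne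
  have hmnd : (mapDict GG).keys.Nodup := by rw [keys_mapDict]; exact hinv.1
  have hitems := PySem.Dict.items_eq_map_keys (mapDict GG) hmnd 0
  simp only []
  rw [← hitems]
  rfl
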